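-- pv_equiv track=rewrite | github.com/chadyu9/cs-4740 | HW 3/srl/utils/srl_utils.py | get_srl_frames_indices
-- ===== SOURCE A (Python) =====
-- def get_srl_frames_indices(token_labels, token_indices):
--   """
--     Gets the indices corresponding to their respective srl frames
--
--     :param token_labels: A list of labels for the tokens
--     :param token_indices: A list of indices of said labels' tokens
--
--     Returns: dictionary of labels and their index spans
--   """
--   label_dict = {"ARGM-TMP":[], "ARG0":[], "ARG1":[], "ARG2":[], "ARGM-LOC":[]}
--   prev_label = 'O'
--   start = token_indices[0]
--
--   for idx, label in enumerate(token_labels):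
--     curr_label = '-'.join(label.split('-')[1:]) if label != 'O' else 'O'
--
--     if label.startswith("B-") or (curr_label != prev_label and curr_label != "O"):
--       if prev_label != "O":
--         label_dict[prev_label].append((start, token_indices[idx-1]))
--       start = token_indices[idx]
--     elif label == "O" and prev_label != "O":
--       label_dict[prev_label].append((start, token_indices[idx-1]))
--       start = None
--
--     prev_label = curr_label
--
--   if start is not None and prev_label != 'O':
--     label_dict[prev_label].append((start, token_indices[idx-1]))
--
--   return label_dict
-- ===== SOURCE B (Python) =====
-- def get_srl_frames_indices(token_labels, token_indices):
--     """
--     Gets the indices corresponding to their respective srl frames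
--
--     :param token_labels: A list of labels for the tokens
--     :param token_indices: A list of indices of said labels' tokens
--
--     Returns: dictionary of labels and their index spans
--     """
--     # Pass 1: collect the maximal labelled runs as [label, first position, last position].
--     runs = []
--     for i, label in enumerate(token_labels):
--         eff = 'O' if label == 'O' else '-'.join(label.split('-')[1:])
--         if eff == 'O':
--             continue
--         if runs and not label.startswith('B-') and runs[-1][0] == eff and runs[-1][2] == i - 1:
--             runs[-1][2] = i
--         else:
--             runs.append([eff, i, i])
--     # Pass 2: turn each run into an inclusive index span under its frame key.
--     label_dict = {"ARGM-TMP": [], "ARG0": [], "ARG1": [], "ARG2": [], "ARGM-LOC": []}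
--     for lab, s, e in runs:
--         label_dict[lab].append((token_indices[s], token_indices[e]))
--     return label_dict
-- ===== Notes on version B (the rewrite author's own statement) =====
-- stated objective: alternative
-- what changed: B replaces A's single stateful loop (prev-label state, appending into the dict as it goes, a trailing post-loop append) by a two-pass decomposition: pass 1 collects the maximal labelled runs as [label, first position, last position] triples, pass 2 turns each run into an inclusive index span under its frame key; Pre_ additionally excludes label lists containing a tag whose effective label is 'O' without being the literal 'O' tag (e.g. 'I-O'), a non-BIO tag on which whether the preceding run is recorded at all is an accident of tag shape that neither program should be held to.
-- intended difference: On inputs whose label list ends in a labelled (non-O) run and whose boundary indices token_indices[n-2] and token_indices[n-1] differ, A closes that final run with end index token_indices[n-2] (the stale loop counter idx = n-1 makes the post-loop append read idx-1), while B returns token_indices[n-1], the index of the run's actual last token, which is the intended inclusive end. — e.g. on get_srl_frames_indices(["B-ARG0", "I-ARG0"], [3, 7]): A returns [("ARGM-TMP", []), ("ARG0", [(3, 3)]), ("ARG1", []), ("ARG2", []), ("ARGM-LOC", [])], B returns [("ARGM-TMP", []), ("ARG0", [(3, 7)]), ("ARG1", []), ("ARG2", []), ("ARGM-LOC", [])]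
import Mathlib
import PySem

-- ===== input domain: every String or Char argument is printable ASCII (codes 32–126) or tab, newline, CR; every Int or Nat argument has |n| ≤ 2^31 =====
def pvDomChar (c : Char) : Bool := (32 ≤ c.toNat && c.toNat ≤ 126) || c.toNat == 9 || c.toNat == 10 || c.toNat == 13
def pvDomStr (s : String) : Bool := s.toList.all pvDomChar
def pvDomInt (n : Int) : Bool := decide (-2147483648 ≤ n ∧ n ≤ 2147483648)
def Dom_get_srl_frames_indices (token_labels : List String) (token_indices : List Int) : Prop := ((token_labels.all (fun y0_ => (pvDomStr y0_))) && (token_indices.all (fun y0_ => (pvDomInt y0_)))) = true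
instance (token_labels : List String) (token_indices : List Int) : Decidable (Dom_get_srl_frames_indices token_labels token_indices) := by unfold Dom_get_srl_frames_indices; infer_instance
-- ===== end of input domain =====

-- B re-implements the extraction as run collection (pass 1) followed by span emission (pass 2)
-- instead of A's stateful dict-appending loop; same cost ('alternative'); B fixes A's stale end
-- index on a trailing labelled run (stated as D_ below).

abbrev SrlDict := PySem.Dict String (List (Int × Int))

-- the effective label: '-'.join(label.split('-')[1:]) if label != 'O' else 'O'  (both Pythons compute this expression)
def srlEff (label : String) : String :=
  if label == "O" then "O"
  else PySem.Str.join "-" (((PySem.Str.split? label "-").getD []).drop 1)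

-- label_dict[k].append(p)  (both Pythons; on a missing key Python raises KeyError — outside Pre_ —
-- while Dict.modify inserts the key, so the ports deviate from Python only outside Pre_)
def srlAppend (d : SrlDict) (k : String) (p : Int × Int) : SrlDict :=
  d.modify k [] (fun l => l ++ [p])

-- the five-key dict literal (both Pythons)
def srlInit : SrlDict :=
  PySem.Dict.ofList [("ARGM-TMP", []), ("ARG0", []), ("ARG1", []), ("ARG2", []), ("ARGM-LOC", [])]

-- ===== PORT A =====
-- A's for-loop: state (label_dict, prev_label, start); i is the enumerate counter
def srlLoopA (inds : List Int) : List String → Nat → SrlDict × String × Option Int → SrlDict × String × Option Int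
  | [], _, st => st
  | label :: rest, i, (d, prev, start) =>
    let curr := srlEff label
    if PySem.Str.startswith label "B-" || (curr != prev && curr != "O") then
      let d' := if prev != "O" then srlAppend d prev (start.getD 0, PySem.List.pyGetD inds ((i : Int) - 1) 0) else d
      srlLoopA inds rest (i + 1) (d', curr, some (PySem.List.pyGetD inds (i : Int) 0))
    else if label == "O" && prev != "O" then
      srlLoopA inds rest (i + 1) (srlAppend d prev (start.getD 0, PySem.List.pyGetD inds ((i : Int) - 1) 0), curr, none)
    else
      srlLoopA inds rest (i + 1) (d, curr, start)

def get_srl_frames_indices (token_labels : List String) (token_indices : List Int) : List (String × List (Int × Int)) :=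
  match PySem.List.pyGet? token_indices 0 with
  | none => []  -- start = token_indices[0] raises IndexError in Python (excluded by Pre_)
  | some s0 =>
    let st := srlLoopA token_indices token_labels 0 (srlInit, "O", some s0)
    -- 'if start is not None and prev_label != O': the trailing append with the leftover idx = len(token_labels) - 1
    let d := if st.2.2.isSome && st.2.1 != "O" then
        srlAppend st.1 st.2.1 (st.2.2.getD 0, PySem.List.pyGetD token_indices ((token_labels.length : Int) - 2) 0)
      else st.1
    d.items

-- ===== PORT B =====
-- Source B pass 1: the runs list, kept in REVERSE (Python appends to runs and mutates runs[-1];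
-- the head of the accumulator is Python's runs[-1]); entries are (label, first pos, last pos)
def srlRunsRev : List String → Nat → List (String × Nat × Nat) → List (String × Nat × Nat)
  | [], _, acc => acc
  | label :: rest, i, acc =>
    let e := srlEff label
    if e == "O" then srlRunsRev rest (i + 1) acc
    else match acc with
      | (l0, s0, e0) :: accRest =>
        if !(PySem.Str.startswith label "B-") && l0 == e && ((e0 : Int) == (i : Int) - 1) then
          srlRunsRev rest (i + 1) ((l0, s0, i) :: accRest)       -- runs[-1][2] = i
        else
          srlRunsRev rest (i + 1) ((e, i, i) :: (l0, s0, e0) :: accRest)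
      | [] => srlRunsRev rest (i + 1) [(e, i, i)]

def get_srl_frames_indices_alt (token_labels : List String) (token_indices : List Int) : List (String × List (Int × Int)) :=
  let runs := (srlRunsRev token_labels 0 []).reverse
  -- Source B pass 2: each run [lab, s, e] becomes the span (token_indices[s], token_indices[e])
  (runs.foldl (fun d r =>
      srlAppend d r.1 (PySem.List.pyGetD token_indices (r.2.1 : Int) 0,
                       PySem.List.pyGetD token_indices (r.2.2 : Int) 0)) srlInit).items

-- ===== PRECONDITION & SPEC =====
-- Pre_ = the inputs on which Python A returns normally, minus one defensible corner: a nonempty index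
-- list, every non-O token's position covered by an index, and every label either the literal 'O' or
-- carrying one of the five frame keys as its effective label.  This excludes (a) inputs where A raises
-- (IndexError/KeyError) and (b) label lists containing a tag whose effective label is 'O' without being
-- the literal 'O' tag (e.g. 'I-O'): a non-BIO tag on which whether the preceding run is recorded at all
-- is an accident of tag shape that neither program should be held to.
def Pre_get_srl_frames_indices (token_labels : List String) (token_indices : List Int) : Prop :=
  1 ≤ token_indices.length ∧
  ∀ (i : Nat) (h : i < token_labels.length), token_labels[i] = "O" ∨
    (srlEff token_labels[i] ∈ (["ARGM-TMP", "ARG0", "ARG1", "ARG2", "ARGM-LOC"] : List String) ∧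
     i < token_indices.length)

instance (token_labels : List String) (token_indices : List Int) : Decidable (Pre_get_srl_frames_indices token_labels token_indices) := by
  unfold Pre_get_srl_frames_indices; infer_instance

def pvWitness_get_srl_frames_indices : List String × List Int :=
  (["B-ARG0", "I-ARG0", "O", "B-ARGM-LOC", "B-ARG1", "O"], [10, 11, 12, 13, 14, 15])

-- On inputs whose label list ends in a labelled (non-O) run and whose boundary indices
-- token_indices[n-2] and token_indices[n-1] (n = number of labels) differ, A closes that final run
-- with end index token_indices[n-2] (the stale loop counter idx = n-1 makes the post-loop append
-- read idx-1), while B returns token_indices[n-1], the index of the run's actual last token,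
-- which is the intended inclusive end.
def D_get_srl_frames_indices (token_labels : List String) (token_indices : List Int) : Prop :=
  token_labels.getLastD "O" ≠ "O" ∧
  (if token_labels.length = 1 then token_indices.getLastD 0
   else token_indices.getD (token_labels.length - 2) 0) ≠
    token_indices.getD (token_labels.length - 1) 0

instance (token_labels : List String) (token_indices : List Int) : Decidable (D_get_srl_frames_indices token_labels token_indices) := by
  unfold D_get_srl_frames_indices; infer_instance

def Spec_get_srl_frames_indices (token_labels : List String) (token_indices : List Int) (out : List (String × List (Int × Int))) : Prop := ¬ D_get_srl_frames_indices token_labels token_indices → out = get_srl_frames_indices_alt token_labels token_indices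
instance (token_labels : List String) (token_indices : List Int) (out : List (String × List (Int × Int))) : Decidable (Spec_get_srl_frames_indices token_labels token_indices out) := by unfold Spec_get_srl_frames_indices; infer_instance

def pvDiffWitness_get_srl_frames_indices : List String × List Int := (["B-ARG0", "I-ARG0"], [3, 7])

def pvDiffWitnessOut_get_srl_frames_indices : (List (String × List (Int × Int))) × (List (String × List (Int × Int))) :=
  ([("ARGM-TMP", []), ("ARG0", [(3, 3)]), ("ARG1", []), ("ARG2", []), ("ARGM-LOC", [])],
   [("ARGM-TMP", []), ("ARG0", [(3, 7)]), ("ARG1", []), ("ARG2", []), ("ARGM-LOC", [])])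

-- ===== CLAIM (what is proved, stated in full; the proofs are below) =====
def Claim_unchanged_get_srl_frames_indices : Prop := ∀ (token_labels : List String) (token_indices : List Int), Dom_get_srl_frames_indices token_labels token_indices → Pre_get_srl_frames_indices token_labels token_indices → Spec_get_srl_frames_indices token_labels token_indices (get_srl_frames_indices token_labels token_indices)

def Claim_changed_get_srl_frames_indices : Prop := Dom_get_srl_frames_indices (pvDiffWitness_get_srl_frames_indices.1) (pvDiffWitness_get_srl_frames_indices.2) ∧ Pre_get_srl_frames_indices (pvDiffWitness_get_srl_frames_indices.1) (pvDiffWitness_get_srl_frames_indices.2) ∧ D_get_srl_frames_indices (pvDiffWitness_get_srl_frames_indices.1) (pvDiffWitness_get_srl_frames_indices.2) ∧ get_srl_frames_indices (pvDiffWitness_get_srl_frames_indices.1) (pvDiffWitness_get_srl_frames_indices.2) = pvDiffWitnessOut_get_srl_frames_indices.1 ∧ get_srl_frames_indices_alt (pvDiffWitness_get_srl_frames_indices.1) (pvDiffWitness_get_srl_frames_indices.2) = pvDiffWitnessOut_get_srl_frames_indices.2 ∧ pvDiffWitnessOut_get_srl_frames_indices.1 ≠ pvDiffWitnessOut_get_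srl_frames_indices.2

def Claim_exact_get_srl_frames_indices : Prop := ∀ (token_labels : List String) (token_indices : List Int), Dom_get_srl_frames_indices token_labels token_indices → Pre_get_srl_frames_indices token_labels token_indices → D_get_srl_frames_indices token_labels token_indices → get_srl_frames_indices token_labels token_indices ≠ get_srl_frames_indices_alt token_labels token_indices

-- ===== LEMMAS AND PROOFS =====
-- the common reference: for either port, the chronological list of recorded (label, (start, end))
-- span records, computed token by token with the open run (label, start value) as state; 'off' is
-- the offset the trailing record's end index is read at (A reads i-2, B reads i-1)
def srlRecs (off : Int) (inds : List Int) : List String → Nat → Option (String × Int) → List (String × (Int × Int))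
  | [], i, op =>
    match op with
    | none => []
    | some (e, s) => [(e, (s, PySem.List.pyGetD inds ((i : Int) - off) 0))]
  | l :: rest, i, op =>
    let e' := srlEff l
    match op with
    | none =>
      if e' == "O" then srlRecs off inds rest (i + 1) none
      else srlRecs off inds rest (i + 1) (some (e', PySem.List.pyGetD inds (i : Int) 0))
    | some (e, s) =>
      if PySem.Str.startswith l "B-" || (e' != e && e' != "O") then
        (e, (s, PySem.List.pyGetD inds ((i : Int) - 1) 0)) ::
          srlRecs off inds rest (i + 1) (if e' == "O" then none else some (e', PySem.List.pyGetD inds (i : Int) 0))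
      else if l == "O" then
        (e, (s, PySem.List.pyGetD inds ((i : Int) - 1) 0)) :: srlRecs off inds rest (i + 1) none
      else if e' == "O" then
        srlRecs off inds rest (i + 1) none
      else
        srlRecs off inds rest (i + 1) op

def srlApply (d : SrlDict) (rs : List (String × (Int × Int))) : SrlDict :=
  rs.foldl (fun d r => srlAppend d r.1 r.2) d

def srlToRec2 (inds : List Int) (r : String × Nat × Nat) : String × (Int × Int) :=
  (r.1, (PySem.List.pyGetD inds (r.2.1 : Int) 0, PySem.List.pyGetD inds (r.2.2 : Int) 0))

-- does the state at the end of the scan hold an open run?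
def srlOpenEnd (ls : List String) (op : Option (String × Int)) : Prop :=
  match ls.getLast? with
  | some l => srlEff l ≠ "O"
  | none => op.isSome = true

lemma srlRecs_cons_some (off : Int) (inds : List Int) (l : String) (rest : List String) (i : Nat) (e : String) (s : Int) :
    srlRecs off inds (l :: rest) i (some (e, s)) =
      (if PySem.Str.startswith l "B-" || (srlEff l != e && srlEff l != "O") then
        (e, (s, PySem.List.pyGetD inds ((i : Int) - 1) 0)) ::
          srlRecs off inds rest (i + 1) (if srlEff l == "O" then none else some (srlEff l, PySem.List.pyGetD inds (i : Int) 0))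
      else if l == "O" then
        (e, (s, PySem.List.pyGetD inds ((i : Int) - 1) 0)) :: srlRecs off inds rest (i + 1) none
      else if srlEff l == "O" then
        srlRecs off inds rest (i + 1) none
      else
        srlRecs off inds rest (i + 1) (some (e, s))) := rfl

lemma srlRecs_cons_none (off : Int) (inds : List Int) (l : String) (rest : List String) (i : Nat) :
    srlRecs off inds (l :: rest) i none =
      (if srlEff l == "O" then srlRecs off inds rest (i + 1) none
       else srlRecs off inds rest (i + 1) (some (srlEff l, PySem.List.pyGetD inds (i : Int) 0))) := rfl

lemma srlEff_O : srlEff "O" = "O" := rfl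

def srlFinish (inds : List Int) (fin : Int) (st : SrlDict × String × Option Int) : SrlDict :=
  if st.2.2.isSome && st.2.1 != "O" then
    srlAppend st.1 st.2.1 (st.2.2.getD 0, PySem.List.pyGetD inds fin 0)
  else st.1

lemma srlLoopA_cons (inds : List Int) (l : String) (rest : List String) (i : Nat) (d : SrlDict) (prev : String) (start : Option Int) :
    srlLoopA inds (l :: rest) i (d, prev, start) =
      (if PySem.Str.startswith l "B-" || (srlEff l != prev && srlEff l != "O") then
        srlLoopA inds rest (i + 1)
          ((if prev != "O" then srlAppend d prev (start.getD 0, PySem.List.pyGetD inds ((i : Int) - 1) 0) else d),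
           srlEff l, some (PySem.List.pyGetD inds (i : Int) 0))
      else if l == "O" && prev != "O" then
        srlLoopA inds rest (i + 1) (srlAppend d prev (start.getD 0, PySem.List.pyGetD inds ((i : Int) - 1) 0), srlEff l, none)
      else
        srlLoopA inds rest (i + 1) (d, srlEff l, start)) := rfl

-- A's loop, followed by the trailing append, applies exactly the record list (with off = 2)
lemma loopA_eq_recs (inds : List Int) (ls : List String) : ∀ (i : Nat) (d : SrlDict) (prev : String) (start : Option Int),
    (prev ≠ "O" → start.isSome = true) →
    srlFinish inds (((i + ls.length : Nat) : Int) - 2) (srlLoopA inds ls i (d, prev, start))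
    = srlApply d (srlRecs 2 inds ls i (if prev == "O" then none else some (prev, start.getD 0))) := by
  induction ls with
  | nil =>
    intro i d prev start h
    by_cases hp : prev = "O"
    · simp [srlLoopA, srlFinish, srlRecs, srlApply, hp]
    · have hs := h hp
      cases start with
      | none => simp at hs
      | some sv => simp [srlLoopA, srlFinish, srlRecs, srlApply, hp]
  | cons l rest ih =>
    intro i d prev start h
    have harith : ((i + (l :: rest).length : Nat) : Int) - 2 = (((i + 1) + rest.length : Nat) : Int) - 2 := by
      simp; omega
    rw [harith, srlLoopA_cons]
    by_cases hp : prev = "O"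
    · subst hp
      by_cases hO : srlEff l = "O"
      · have hbne : (srlEff l != "O") = false := by simp [hO]
        cases hB : PySem.Str.startswith l "B-" with
        | true =>
          simp only [Bool.true_or, beq_self_eq_true, if_true, bne_self_eq_false,
            Bool.false_eq_true, if_false]
          rw [ih (i + 1) d (srlEff l) (some (PySem.List.pyGetD inds (i : Int) 0)) (by intro _; simp)]
          rw [srlRecs_cons_none]
          simp [hO]
        | false =>
          simp only [Bool.false_or, hbne, Bool.and_self, bne_self_eq_false, Bool.and_false,
            Bool.false_eq_true, if_false, beq_self_eq_true, if_true]
          rw [ih (i + 1) d (srlEff l) start (by rw [hO]; intro hx; exact absurd rfl hx)]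
          rw [srlRecs_cons_none]
          simp [hO]
      · have hbne : (srlEff l != "O") = true := by simp [hO]
        simp only [hbne, Bool.and_self, Bool.or_true, beq_self_eq_true, if_true,
          bne_self_eq_false, Bool.false_eq_true, if_false]
        rw [ih (i + 1) d (srlEff l) (some (PySem.List.pyGetD inds (i : Int) 0)) (by intro _; simp)]
        rw [srlRecs_cons_none]
        simp [hO]
    · have hs := h hp
      obtain ⟨sv, rfl⟩ : ∃ sv, start = some sv := by
        cases start with
        | none => simp at hs
        | some sv => exact ⟨sv, rfl⟩
      have hprev : (prev != "O") = true := by simp [hp]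
      have hpeq : (prev == "O") = false := by simp [hp]
      rw [hpeq]
      simp only [Bool.false_eq_true, if_false]
      rw [srlRecs_cons_some, hprev]
      simp only [Bool.and_true, if_true]
      by_cases hc1 : (PySem.Str.startswith l "B-" || (srlEff l != prev && srlEff l != "O")) = true
      · rw [hc1]
        simp only [if_true]
        by_cases hO : srlEff l = "O"
        · rw [ih (i + 1) _ (srlEff l) (some (PySem.List.pyGetD inds (i : Int) 0)) (by rw [hO]; intro hx; exact absurd rfl hx)]
          simp [srlApply]
        · rw [ih (i + 1) _ (srlEff l) (some (PySem.List.pyGetD inds (i : Int) 0)) (by intro _; simp)]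
          simp [srlApply]
      · have hc1' : (PySem.Str.startswith l "B-" || (srlEff l != prev && srlEff l != "O")) = false :=
          Bool.eq_false_iff.mpr hc1
        rw [hc1']
        simp only [Bool.false_eq_true, if_false]
        by_cases hlO : l = "O"
        · have hc2 : (l == "O" && (prev != "O")) = true := by simp [hlO, hp]
          have hc3 : (l == "O") = true := by simp [hlO]
          rw [hc3]
          simp only [if_true]
          rw [ih (i + 1) _ (srlEff l) none (by rw [hlO, srlEff_O]; intro hx; exact absurd rfl hx)]
          simp [hlO, srlEff_O, srlApply]
        · have hc2 : (l == "O" && (prev != "O")) = false := by simp [hlO]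
          have hc3 : (l == "O") = false := by simp [hlO]
          rw [hc3]
          simp only [Bool.false_eq_true, if_false]
          by_cases hO : srlEff l = "O"
          · have hc4 : (srlEff l == "O") = true := by simp [hO]
            rw [hc4]
            simp only [if_true]
            rw [ih (i + 1) d (srlEff l) (some sv) (by rw [hO]; intro hx; exact absurd rfl hx)]
            simp [hO]
          · have hcp : srlEff l = prev := by
              by_contra hne
              apply hc1
              simp [hne, hO]
            have hc4 : (srlEff l == "O") = false := by simp [hO]
            rw [hc4]
            simp only [Bool.false_eq_true, if_false]
            rw [ih (i + 1) d (srlEff l) (some sv) (by intro _; simp)]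
            rw [hcp]
            simp [hp]

-- B's reverse run accumulator applies exactly the record list (with off = 1)
lemma srlRunsRev_cons_nil (l : String) (rest : List String) (i : Nat) :
    srlRunsRev (l :: rest) i [] =
      (if srlEff l == "O" then srlRunsRev rest (i + 1) []
       else srlRunsRev rest (i + 1) [(srlEff l, i, i)]) := rfl

lemma srlRunsRev_cons_cons (l : String) (rest : List String) (i : Nat) (l0 : String) (s0 e0 : Nat) (accRest : List (String × Nat × Nat)) :
    srlRunsRev (l :: rest) i ((l0, s0, e0) :: accRest) =
      (if srlEff l == "O" then srlRunsRev rest (i + 1) ((l0, s0, e0) :: accRest)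
       else if !(PySem.Str.startswith l "B-") && l0 == srlEff l && ((e0 : Int) == (i : Int) - 1) then
         srlRunsRev rest (i + 1) ((l0, s0, i) :: accRest)
       else
         srlRunsRev rest (i + 1) ((srlEff l, i, i) :: (l0, s0, e0) :: accRest)) := rfl

lemma srlRunsRev_cons_skip (l : String) (rest : List String) (i : Nat) (acc : List (String × Nat × Nat))
    (hO : srlEff l = "O") : srlRunsRev (l :: rest) i acc = srlRunsRev rest (i + 1) acc := by
  cases acc with
  | nil => rw [srlRunsRev_cons_nil]; simp [hO]
  | cons r t =>
    obtain ⟨r1, r2, r3⟩ := r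
    rw [srlRunsRev_cons_cons]; simp [hO]

lemma runsRev_eq_recs (inds : List Int) (ls : List String) : ∀ (i : Nat) (acc : List (String × Nat × Nat)) (op : Option (String × Nat)),
    (∀ l ∈ ls, srlEff l = "O" → l = "O") →
    (match op with
     | some p => 1 ≤ i ∧ p.1 ≠ "O" ∧ ∃ tl, acc = (p.1, p.2, i - 1) :: tl
     | none => ∀ r ∈ acc.head?, r.2.2 + 1 < i) →
    ((srlRunsRev ls i acc).reverse).map (srlToRec2 inds)
      = ((match op with | some _ => acc.tail | none => acc).reverse).map (srlToRec2 inds)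
        ++ srlRecs 1 inds ls i (op.map (fun p => (p.1, PySem.List.pyGetD inds (p.2 : Int) 0))) := by
  induction ls with
  | nil =>
    intro i acc op hGood hacc
    cases op with
    | none => simp [srlRunsRev, srlRecs]
    | some p =>
      obtain ⟨h1, hne, tl, rfl⟩ := hacc
      have hcast : ((i - 1 : Nat) : Int) = (i : Int) - 1 := by omega
      simp [srlRunsRev, srlRecs, srlToRec2, hcast]
  | cons l rest ih =>
    intro i acc op hGood hacc
    have hGood' : ∀ l' ∈ rest, srlEff l' = "O" → l' = "O" :=
      fun l' h => hGood l' (List.mem_cons_of_mem _ h)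
    by_cases hO : srlEff l = "O"
    · cases op with
      | none =>
        simp only [Option.map_none]
        rw [srlRunsRev_cons_skip l rest i acc hO, srlRecs_cons_none]
        simp only [hO, beq_self_eq_true, if_true]
        exact ih (i + 1) acc none hGood' (by intro r hr; have := hacc r hr; omega)
      | some p =>
        obtain ⟨h1, hne, tl, rfl⟩ := hacc
        have hl : l = "O" := hGood l (List.mem_cons_self) hO
        have hcast : ((i - 1 : Nat) : Int) = (i : Int) - 1 := by omega
        simp only [Option.map_some]
        rw [srlRunsRev_cons_skip l rest i _ hO]
        rw [ih (i + 1) ((p.1, p.2, i - 1) :: tl) none hGood'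
          (by intro r hr; simp at hr; subst hr; simp; omega)]
        subst hl
        rw [srlRecs_cons_some]
        have hB : PySem.Chars.startswith ['O'] ['B', '-'] = false := by decide
        simp [hB, srlEff_O, srlToRec2, hcast]
    · have hlO : l ≠ "O" := fun h => hO (h ▸ srlEff_O)
      have hcne : (srlEff l == "O") = false := by simp [hO]
      cases op with
      | some p =>
        obtain ⟨h1, hne, tl, rfl⟩ := hacc
        have hcast : ((i - 1 : Nat) : Int) = (i : Int) - 1 := by omega
        simp only [Option.map_some]
        rw [srlRunsRev_cons_cons, hcne]
        simp only [Bool.false_eq_true, if_false]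
        by_cases hB : PySem.Str.startswith l "B-" = true
        · have hBc : PySem.Chars.startswith l.toList ['B', '-'] = true := by simpa using hB
          have hcond : (!(PySem.Str.startswith l "B-") && (p.1 == srlEff l) && (((i - 1 : Nat) : Int) == (i : Int) - 1)) = false := by
            simp [hBc]
          rw [hcond]
          simp only [Bool.false_eq_true, if_false]
          rw [ih (i + 1) ((srlEff l, i, i) :: (p.1, p.2, i - 1) :: tl) (some (srlEff l, i)) hGood'
            ⟨by omega, hO, ⟨(p.1, p.2, i - 1) :: tl, by simp⟩⟩]
          rw [srlRecs_cons_some]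
          simp [hBc, hcne, srlToRec2, hcast]
        · have hBc : PySem.Chars.startswith l.toList ['B', '-'] = false := by
            simpa using Bool.eq_false_iff.mpr hB
          by_cases hEq : p.1 = srlEff l
          · have hcond : (!(PySem.Str.startswith l "B-") && (p.1 == srlEff l) && (((i - 1 : Nat) : Int) == (i : Int) - 1)) = true := by
              simp [hBc, hEq, hcast]
            rw [hcond]
            simp only [if_true]
            rw [ih (i + 1) ((p.1, p.2, i) :: tl) (some p) hGood' ⟨by omega, hne, ⟨tl, by simp⟩⟩]
            rw [srlRecs_cons_some]
            have hb1 : (PySem.Str.startswith l "B-" || (srlEff l != p.1 && srlEff l != "O")) = false := by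
              simp [hBc, hEq]
            rw [hb1]
            have hc3 : (l == "O") = false := by simp [hlO]
            rw [hc3]
            simp [hcne]
          · have hcond : (!(PySem.Str.startswith l "B-") && (p.1 == srlEff l) && (((i - 1 : Nat) : Int) == (i : Int) - 1)) = false := by
              simp [hEq]
            rw [hcond]
            simp only [Bool.false_eq_true, if_false]
            rw [ih (i + 1) ((srlEff l, i, i) :: (p.1, p.2, i - 1) :: tl) (some (srlEff l, i)) hGood'
              ⟨by omega, hO, ⟨(p.1, p.2, i - 1) :: tl, by simp⟩⟩]
            rw [srlRecs_cons_some]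
            have hb1 : (PySem.Str.startswith l "B-" || (srlEff l != p.1 && srlEff l != "O")) = true := by
              simp [hO]
              exact Or.inr (fun hh => hEq hh.symm)
            rw [hb1]
            simp [hcne, srlToRec2, hcast]
      | none =>
        cases acc with
        | nil =>
          simp only [Option.map_none]
          rw [srlRunsRev_cons_nil, hcne]
          simp only [Bool.false_eq_true, if_false]
          rw [ih (i + 1) [(srlEff l, i, i)] (some (srlEff l, i)) hGood' ⟨by omega, hO, ⟨[], by simp⟩⟩]
          rw [srlRecs_cons_none, hcne]
          simp
        | cons r t =>
          obtain ⟨r1, r2, r3⟩ := r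
          have hr := hacc (r1, r2, r3) (by simp)
          simp only [Option.map_none]
          rw [srlRunsRev_cons_cons, hcne]
          simp only [Bool.false_eq_true, if_false]
          have hr' : r3 + 1 < i := by simpa using hr
          have hcond : (!(PySem.Str.startswith l "B-") && (r1 == srlEff l) && ((r3 : Int) == (i : Int) - 1)) = false := by
            have : ((r3 : Int) == (i : Int) - 1) = false := by simp; omega
            simp [this]
          rw [hcond]
          simp only [Bool.false_eq_true, if_false]
          rw [ih (i + 1) ((srlEff l, i, i) :: (r1, r2, r3) :: t) (some (srlEff l, i)) hGood'
            ⟨by omega, hO, ⟨(r1, r2, r3) :: t, by simp⟩⟩]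
          rw [srlRecs_cons_none, hcne]
          simp

-- the off-2 and off-1 record lists agree when the scan does not end in an open run, or when the
-- two boundary index entries coincide
lemma openEnd_cons_up (l : String) (rest : List String) (op op' : Option (String × Int))
    (hnil : rest = [] → op'.isSome = true → srlEff l ≠ "O") :
    srlOpenEnd rest op' → srlOpenEnd (l :: rest) op := by
  cases rest with
  | nil =>
    intro h
    unfold srlOpenEnd at h ⊢
    simpa using hnil rfl h
  | cons b t =>
    intro h
    unfold srlOpenEnd at h ⊢
    rwa [List.getLast?_cons_cons]

lemma openEnd_cons_down (l : String) (rest : List String) (op op' : Option (String × Int))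
    (hnil : rest = [] → srlEff l ≠ "O" → op'.isSome = true) :
    srlOpenEnd (l :: rest) op → srlOpenEnd rest op' := by
  cases rest with
  | nil =>
    intro h
    unfold srlOpenEnd at h ⊢
    simp at h
    exact hnil rfl h
  | cons b t =>
    intro h
    unfold srlOpenEnd at h ⊢
    rwa [List.getLast?_cons_cons] at h

lemma recs_off_eq (inds : List Int) (ls : List String) : ∀ (i : Nat) (op : Option (String × Int)),
    (srlOpenEnd ls op → PySem.List.pyGetD inds (((i + ls.length : Nat) : Int) - 2) 0
                      = PySem.List.pyGetD inds (((i + ls.length : Nat) : Int) - 1) 0) →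
    srlRecs 2 inds ls i op = srlRecs 1 inds ls i op := by
  induction ls with
  | nil =>
    intro i op h
    cases op with
    | none => rfl
    | some p =>
      have hh := h (by unfold srlOpenEnd; simp)
      simp only [List.length_nil, Nat.add_zero] at hh
      obtain ⟨e, s⟩ := p
      show [(e, (s, PySem.List.pyGetD inds ((i : Int) - 2) 0))]
         = [(e, (s, PySem.List.pyGetD inds ((i : Int) - 1) 0))]
      rw [hh]
  | cons l rest ih =>
    intro i op h
    have hlen : ((i + (l :: rest).length : Nat) : Int) = (((i + 1) + rest.length : Nat) : Int) := by
      simp; omega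
    have step : ∀ op', (rest = [] → op'.isSome = true → srlEff l ≠ "O") →
        srlRecs 2 inds rest (i + 1) op' = srlRecs 1 inds rest (i + 1) op' := by
      intro op' hnil
      apply ih
      intro ho
      have hh := h (openEnd_cons_up l rest op op' hnil ho)
      rwa [hlen] at hh
    cases op with
    | none =>
      rw [srlRecs_cons_none, srlRecs_cons_none]
      by_cases hO : srlEff l = "O"
      · simp only [hO, beq_self_eq_true, if_true]
        exact step none (by intro _ hs; simp at hs)
      · have hc : (srlEff l == "O") = false := by simp [hO]
        rw [hc]
        simp only [Bool.false_eq_true, if_false]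
        exact step _ (fun _ _ => hO)
    | some p =>
      obtain ⟨e, s⟩ := p
      rw [srlRecs_cons_some, srlRecs_cons_some]
      by_cases hc1 : (PySem.Str.startswith l "B-" || (srlEff l != e && srlEff l != "O")) = true
      · rw [hc1]
        simp only [if_true]
        by_cases hO : srlEff l = "O"
        · simp only [hO, beq_self_eq_true, if_true]
          rw [step none (by intro _ hs; simp at hs)]
        · have hc : (srlEff l == "O") = false := by simp [hO]
          rw [hc]
          simp only [Bool.false_eq_true, if_false]
          rw [step _ (fun _ _ => hO)]
      · have hc1' := Bool.eq_false_iff.mpr hc1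
        rw [hc1']
        simp only [Bool.false_eq_true, if_false]
        by_cases hlO : l = "O"
        · have hc3 : (l == "O") = true := by simp [hlO]
          rw [hc3]
          simp only [if_true]
          rw [step none (by intro _ hs; simp at hs)]
        · have hc3 : (l == "O") = false := by simp [hlO]
          rw [hc3]
          simp only [Bool.false_eq_true, if_false]
          by_cases hO : srlEff l = "O"
          · have hc4 : (srlEff l == "O") = true := by simp [hO]
            rw [hc4]
            simp only [if_true]
            exact step none (by intro _ hs; simp at hs)
          · have hc4 : (srlEff l == "O") = false := by simp [hO]
            rw [hc4]
            simp only [Bool.false_eq_true, if_false]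
            exact step _ (fun _ _ => hO)


-- with an open run at the end, the record list is a shared prefix plus one trailing record whose
-- end entry alone depends on the offset
lemma recs_decomp (inds : List Int) (ls : List String) : ∀ (i : Nat) (op : Option (String × Int)),
    srlOpenEnd ls op →
    ∃ pre e sv, ∀ off : Int, srlRecs off inds ls i op
      = pre ++ [(e, (sv, PySem.List.pyGetD inds (((i + ls.length : Nat) : Int) - off) 0))] := by
  induction ls with
  | nil =>
    intro i op ho
    cases op with
    | none => unfold srlOpenEnd at ho; simp at ho
    | some p =>
      refine ⟨[], p.1, p.2, fun off => ?_⟩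
      simp [srlRecs]
  | cons l rest ih =>
    intro i op ho
    have hlen : (((i + 1) + rest.length : Nat) : Int) = ((i + (l :: rest).length : Nat) : Int) := by
      simp; omega
    have step : ∀ (op' : Option (String × Int)) (em : List (String × (Int × Int))),
        (rest = [] → srlEff l ≠ "O" → op'.isSome = true) →
        (∀ off : Int, srlRecs off inds (l :: rest) i op = em ++ srlRecs off inds rest (i + 1) op') →
        ∃ pre e sv, ∀ off : Int, srlRecs off inds (l :: rest) i op
          = pre ++ [(e, (sv, PySem.List.pyGetD inds (((i + (l :: rest).length : Nat) : Int) - off) 0))] := by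
      intro op' em hnil heq
      obtain ⟨pre, e, sv, hd⟩ := ih (i + 1) op' (openEnd_cons_down l rest op op' hnil ho)
      refine ⟨em ++ pre, e, sv, fun off => ?_⟩
      rw [heq off, hd off, hlen, List.append_assoc]
    cases op with
    | none =>
      by_cases hO : srlEff l = "O"
      · exact step none [] (fun _ hne => absurd hO hne)
          (fun off => by rw [srlRecs_cons_none]; simp [hO])
      · exact step (some (srlEff l, PySem.List.pyGetD inds (i : Int) 0)) [] (fun _ _ => rfl)
          (fun off => by rw [srlRecs_cons_none]; simp [hO])
    | some p =>
      obtain ⟨e, s⟩ := p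
      by_cases hc1 : (PySem.Str.startswith l "B-" || (srlEff l != e && srlEff l != "O")) = true
      · by_cases hO : srlEff l = "O"
        · exact step none [(e, (s, PySem.List.pyGetD inds ((i : Int) - 1) 0))]
            (fun _ hne => absurd hO hne)
            (fun off => by rw [srlRecs_cons_some, hc1]; simp [hO])
        · exact step (some (srlEff l, PySem.List.pyGetD inds (i : Int) 0))
            [(e, (s, PySem.List.pyGetD inds ((i : Int) - 1) 0))] (fun _ _ => rfl)
            (fun off => by rw [srlRecs_cons_some, hc1]; simp [hO])
      · have hc1' := Bool.eq_false_iff.mpr hc1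
        by_cases hlO : l = "O"
        · exact step none [(e, (s, PySem.List.pyGetD inds ((i : Int) - 1) 0))]
            (fun _ hne => absurd (hlO ▸ srlEff_O) hne)
            (fun off => by rw [srlRecs_cons_some, hc1']; simp [hlO])
        · by_cases hO : srlEff l = "O"
          · exact step none [] (fun _ hne => absurd hO hne)
              (fun off => by rw [srlRecs_cons_some, hc1']; simp [hlO, hO])
          · exact step (some (e, s)) [] (fun _ _ => rfl)
              (fun off => by rw [srlRecs_cons_some, hc1']; simp [hlO, hO])


-- D_'s two boundary entries, written with plain list primitives, are the Python reads
lemma dEndA (ls : List String) (inds : List Int) (h : ls ≠ []) :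
    (if ls.length = 1 then inds.getLastD 0 else inds.getD (ls.length - 2) 0)
      = PySem.List.pyGetD inds ((ls.length : Int) - 2) 0 := by
  by_cases h1 : ls.length = 1
  · have hidx : ((ls.length : Int) - 2) = -1 := by rw [h1]; norm_num
    rw [if_pos h1, hidx]
    cases inds with
    | nil => simp [PySem.List.pyGetD, PySem.List.pyGet?, PySem.List.pyIdx?]
    | cons a t =>
      rw [PySem.List.pyGetD_neg_one (a :: t) 0 (List.cons_ne_nil a t)]
      rw [List.getLastD_eq_getLast?, List.getLast?_eq_some_getLast (List.cons_ne_nil a t)]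
      rfl
  · have h2 : 2 ≤ ls.length := by
      have := List.length_pos_iff.mpr h
      omega
    have hidx : ((ls.length : Int) - 2) = ((ls.length - 2 : Nat) : Int) := by omega
    rw [if_neg h1, hidx, PySem.List.pyGetD_natCast]

lemma dEndB (ls : List String) (inds : List Int) (h : ls ≠ []) :
    inds.getD (ls.length - 1) 0 = PySem.List.pyGetD inds ((ls.length : Int) - 1) 0 := by
  have h1 : 1 ≤ ls.length := List.length_pos_iff.mpr h
  have hidx : ((ls.length : Int) - 1) = ((ls.length - 1 : Nat) : Int) := by omega
  rw [hidx, PySem.List.pyGetD_natCast]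

lemma portA_eq (ls : List String) (a : Int) (t : List Int) :
    get_srl_frames_indices ls (a :: t) = (srlApply srlInit (srlRecs 2 (a :: t) ls 0 none)).items := by
  have hA := loopA_eq_recs (a :: t) ls 0 srlInit "O" (some a) (by intro hx; exact absurd rfl hx)
  simp only [Nat.zero_add, beq_self_eq_true, if_true] at hA
  unfold get_srl_frames_indices
  rw [show PySem.List.pyGet? (a :: t) 0 = some a from by simp [PySem.List.pyGet?, PySem.List.pyIdx?]]
  exact congrArg PySem.Dict.items hA

lemma portB_eq (ls : List String) (inds : List Int)
    (hGood : ∀ l ∈ ls, srlEff l = "O" → l = "O") :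
    get_srl_frames_indices_alt ls inds = (srlApply srlInit (srlRecs 1 inds ls 0 none)).items := by
  have hB := runsRev_eq_recs inds ls 0 [] none hGood (by intro r hr; simp at hr)
  simp only [List.reverse_nil, List.map_nil, List.nil_append, Option.map_none] at hB
  unfold get_srl_frames_indices_alt
  refine congrArg PySem.Dict.items ?_
  rw [srlApply, ← hB, List.foldl_map]
  rfl

-- hGood from Pre_
lemma pre_good (ls : List String) (inds : List Int)
    (hpre : Pre_get_srl_frames_indices ls inds) : ∀ l ∈ ls, srlEff l = "O" → l = "O" := by
  intro l hl hO
  obtain ⟨j, hj, rfl⟩ := List.mem_iff_getElem.mp hl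
  rcases hpre.2 j hj with h | h
  · exact h
  · rw [hO] at h
    have : ("O" : String) ∈ (["ARGM-TMP", "ARG0", "ARG1", "ARG2", "ARGM-LOC"] : List String) := h.1
    simp at this

-- ===== VERDICT (by name: the statement is the Claim_ definition above) =====
theorem get_srl_frames_indices_spec : Claim_unchanged_get_srl_frames_indices := by
  intro ls inds hdom hpre
  unfold Spec_get_srl_frames_indices
  intro hnD
  cases inds with
  | nil => simp [Pre_get_srl_frames_indices] at hpre
  | cons a t =>
    rw [portA_eq, portB_eq ls (a :: t) (pre_good ls (a :: t) hpre)]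
    refine congrArg _ (congrArg _ ?_)
    apply recs_off_eq
    intro hopen
    unfold srlOpenEnd at hopen
    by_contra hne
    apply hnD
    unfold D_get_srl_frames_indices
    cases hls : ls.getLast? with
    | none => rw [hls] at hopen; simp at hopen
    | some x =>
      rw [hls] at hopen
      have hlsne : ls ≠ [] := by intro hn; rw [hn] at hls; simp at hls
      have hx : ls.getLastD "O" = x := by
        rw [List.getLastD_eq_getLast?, hls]; rfl
      constructor
      · rw [hx]
        intro hxO
        exact hopen (by rw [hxO]; rfl)
      · rw [dEndA ls (a :: t) hlsne, dEndB ls (a :: t) hlsne]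
        simpa using hne

theorem get_srl_frames_indices_changed : Claim_changed_get_srl_frames_indices := by
  unfold Claim_changed_get_srl_frames_indices; decide

theorem get_srl_frames_indices_tight : Claim_exact_get_srl_frames_indices := by
  intro ls inds hdom hpre hD
  obtain ⟨hD1, hD2⟩ := hD
  have hls : ls ≠ [] := by
    intro h; subst h; simp [List.getLastD] at hD1
  have hopen : srlOpenEnd ls none := by
    unfold srlOpenEnd
    cases hg : ls.getLast? with
    | none => exact absurd (List.getLast?_eq_none_iff.mp hg) hls
    | some x =>
      have hx : ls.getLastD "O" = x := by rw [List.getLastD_eq_getLast?, hg]; rfl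
      intro heff
      exact hD1 (hx ▸ pre_good ls inds hpre x (List.mem_of_getLast? hg) heff)
  cases inds with
  | nil => simp [Pre_get_srl_frames_indices] at hpre
  | cons a t =>
    rw [dEndA ls (a :: t) hls, dEndB ls (a :: t) hls] at hD2
    rw [portA_eq, portB_eq ls (a :: t) (pre_good ls (a :: t) hpre)]
    obtain ⟨pre, e, sv, hdec⟩ := recs_decomp (a :: t) ls 0 none hopen
    rw [hdec 2, hdec 1]
    simp only [Nat.zero_add]
    intro heq
    have hdicts := PySem.Dict.ext heq
    have hval := congrArg (fun d => PySem.Dict.getD d e []) hdicts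
    simp only [srlApply, List.foldl_append, List.foldl_cons, List.foldl_nil] at hval
    unfold srlAppend at hval
    rw [PySem.Dict.getD_modify_self, PySem.Dict.getD_modify_self] at hval
    simp at hval
    exact hD2 hval
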